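-- pv_equiv track=rewrite | github.com/spegeerino/projects | Project Euler/projeuler500.py | custom_pf
-- ===== SOURCE A (Python) =====
-- import math as m
--
-- def custom_pf(n):
--     if n == 1:
--         return {}
--     for i in range(2, (int)(m.sqrt(n) + 1)):
--         if n % i == 0:
--             p_index = 0
--             newnum = n
--             while newnum % i == 0:
--                 p_index += 1
--                 newnum //= i
--             if newnum != 1:
--                 return
--             return {i:p_index}
--     return {n:1}
-- ===== SOURCE B (Python) =====
-- import math as m
--
-- def custom_pf(n):
--     # Full trial-division factor table over the same sqrt-bounded range, then classify,
--     # instead of A's early return on the first divisor.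
--     if n == 1:
--         return {}
--     factors = {}
--     temp = n
--     for i in range(2, (int)(m.sqrt(n) + 1)):
--         while temp % i == 0:
--             factors[i] = factors.get(i, 0) + 1
--             temp //= i
--     if not factors:
--         return {n: 1}
--     if len(factors) == 1 and temp == 1:
--         return factors
--     return None
-- ===== Notes on version B (the rewrite author's own statement) =====
-- stated objective: alternative
-- what changed: A short-circuits on the first divisor found and factors only it; B runs the trial division over the whole sqrt-bounded range, building the complete factor table and the reduced remainder, and classifies that table afterwards (empty -> {n:1}, one prime fully dividing -> that dict, otherwise None).
import Mathlib
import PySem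

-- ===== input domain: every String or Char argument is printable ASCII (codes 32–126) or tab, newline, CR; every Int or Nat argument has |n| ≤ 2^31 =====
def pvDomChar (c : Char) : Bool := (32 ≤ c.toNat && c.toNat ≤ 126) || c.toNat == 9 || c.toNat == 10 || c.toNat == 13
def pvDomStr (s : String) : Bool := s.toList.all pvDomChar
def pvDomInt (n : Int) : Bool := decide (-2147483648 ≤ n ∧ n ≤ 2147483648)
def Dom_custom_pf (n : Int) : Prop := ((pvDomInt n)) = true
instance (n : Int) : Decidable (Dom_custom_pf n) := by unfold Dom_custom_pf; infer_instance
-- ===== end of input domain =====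

-- B replaces A's early return on the first divisor by computing the full trial-division
-- factor table over the same sqrt-bounded range and classifying it afterwards (objective: alternative).

-- ===== PORT A =====
-- A's inner while loop: returns (p_index, newnum); the fuel only makes the recursion
-- total (the loop runs at most newnum.natAbs times on the admitted inputs).
def pfDivOut (i : Int) : Int → Nat → Int × Int
  | newnum, 0 => (0, newnum)
  | newnum, f+1 =>
    if PySem.Int.mod newnum i == 0 then
      let r := pfDivOut i (PySem.Int.floordiv newnum i) f
      (r.1 + 1, r.2)
    else (0, newnum)

-- A's for loop over range(2, int(sqrt(n)+1))
def pfLoopA (n : Int) : List Int → Option (List (Int × Int))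
  | [] => some [(n, 1)]
  | i :: rest =>
    if PySem.Int.mod n i == 0 then
      let r := pfDivOut i n n.natAbs
      if r.2 ≠ 1 then none else some [(i, r.1)]
    else pfLoopA n rest

-- int(m.sqrt(n)+1) is ported as Int.sqrt n + 1: exact for 0 ≤ n ≤ 2^31 (the float sqrt
-- is correctly rounded there); for n < 0 Python raises ValueError (excluded by Pre_).
def custom_pf (n : Int) : Option (List (Int × Int)) :=
  if n == 1 then some []
  else pfLoopA n (PySem.List.pyRange 2 (Int.sqrt n + 1) 1)

-- ===== PORT B =====
-- B's inner while loop: divides i out of temp, accumulating into factors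
def pfWhileB (i : Int) : Int → PySem.Dict Int Int → Nat → PySem.Dict Int Int × Int
  | temp, factors, 0 => (factors, temp)
  | temp, factors, f+1 =>
    if PySem.Int.mod temp i == 0 then
      pfWhileB i (PySem.Int.floordiv temp i) (factors.insert i (factors.getD i 0 + 1)) f
    else (factors, temp)

-- B's for loop, threading (factors, temp)
def pfLoopB : List Int → Int → PySem.Dict Int Int → PySem.Dict Int Int × Int
  | [], temp, factors => (factors, temp)
  | i :: rest, temp, factors =>
    let s := pfWhileB i temp factors temp.natAbs
    pfLoopB rest s.2 s.1

def custom_pf_alt (n : Int) : Option (List (Int × Int)) :=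
  if n == 1 then some []
  else
    let s := pfLoopB (PySem.List.pyRange 2 (Int.sqrt n + 1) 1) n PySem.Dict.empty
    if s.1.items = [] then some [(n, 1)]
    else if s.1.size = 1 ∧ s.2 = 1 then some s.1.items
    else none

-- ===== PRECONDITION & SPEC =====
-- Pre_ excludes exactly n < 0, where math.sqrt raises ValueError in both A and B.
def Pre_custom_pf (n : Int) : Prop := 0 ≤ n
instance (n : Int) : Decidable (Pre_custom_pf n) := by unfold Pre_custom_pf; infer_instance
def pvWitness_custom_pf : Int := (12)

def Spec_custom_pf (n : Int) (out : Option (List (Int × Int))) : Prop := out = custom_pf_alt n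
instance (n : Int) (out : Option (List (Int × Int))) : Decidable (Spec_custom_pf n out) := by unfold Spec_custom_pf; infer_instance

-- ===== CLAIM (what is proved, stated in full; the proofs are below) =====
def Claim_equal_custom_pf : Prop := ∀ (n : Int), Dom_custom_pf n → Pre_custom_pf n → Spec_custom_pf n (custom_pf n)

-- ===== LEMMAS AND PROOFS =====

-- arithmetic: dividing a positive multiple of i (i ≥ 2) strictly shrinks it
theorem pf_div_shrink {t i : Int} (hi : 2 ≤ i) (ht : 1 ≤ t)
    (hd : PySem.Int.mod t i = 0) :
    1 ≤ PySem.Int.floordiv t i ∧ PySem.Int.floordiv t i < t := by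
  rw [PySem.Int.mod_eq_emod_of_pos (by omega)] at hd
  rw [PySem.Int.floordiv_eq_ediv_of_pos (by omega)]
  obtain ⟨q, hq⟩ := Int.dvd_of_emod_eq_zero hd
  have hi0 : i ≠ 0 := by omega
  have hq' : t / i = q := by rw [hq]; exact Int.mul_ediv_cancel_left q hi0
  rw [hq']
  constructor <;> nlinarith

-- A's while loop: with enough fuel the result is positive and no longer divisible by i
theorem pfDivOut_spec (i : Int) (hi : 2 ≤ i) :
    ∀ (fuel : Nat) (t : Int), 1 ≤ t → t.natAbs ≤ fuel →
      1 ≤ (pfDivOut i t fuel).2 ∧ PySem.Int.mod (pfDivOut i t fuel).2 i ≠ 0 := by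
  intro fuel
  induction fuel with
  | zero => intro t ht hf; omega
  | succ f ih =>
    intro t ht hf
    by_cases hd : PySem.Int.mod t i = 0
    · have hsh := pf_div_shrink hi ht hd
      have := ih (PySem.Int.floordiv t i) hsh.1 (by omega)
      simp only [pfDivOut, hd]
      simpa using this
    · simp only [pfDivOut]
      rw [if_neg (by simpa using hd)]
      exact ⟨ht, hd⟩

-- B's while loop is the identity when i does not divide temp (or fuel is 0)
theorem pfWhileB_nodvd (i t : Int) (f : PySem.Dict Int Int) (fuel : Nat)
    (h : PySem.Int.mod t i ≠ 0) : pfWhileB i t f fuel = (f, t) := by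
  cases fuel with
  | zero => rfl
  | succ f' =>
    have h' : (PySem.Int.mod t i == 0) = false := by simpa using h
    simp only [pfWhileB, h', if_false, Bool.false_eq_true]

-- B's while loop on a singleton dict keyed by i just adds the division count
theorem pfWhileB_single (i : Int) :
    ∀ (fuel : Nat) (t k : Int),
      pfWhileB i t (PySem.Dict.mk [(i, k)]) fuel =
        (PySem.Dict.mk [(i, k + (pfDivOut i t fuel).1)], (pfDivOut i t fuel).2) := by
  intro fuel
  induction fuel with
  | zero => intro t k; simp [pfWhileB, pfDivOut]
  | succ f ih =>
    intro t k
    by_cases hd : PySem.Int.mod t i = 0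
    · have hd' : (PySem.Int.mod t i == 0) = true := by simpa using hd
      have hins : (PySem.Dict.mk [(i, k)]).insert i ((PySem.Dict.mk [(i, k)]).getD i 0 + 1)
          = PySem.Dict.mk [(i, k + 1)] := by
        simp [PySem.Dict.insert, PySem.Dict.getD, PySem.Dict.get?, PySem.Dict.contains]
      simp only [pfWhileB, pfDivOut, hd', if_true, hins, ih]
      have : k + 1 + (pfDivOut i (PySem.Int.floordiv t i) f).1
          = k + ((pfDivOut i (PySem.Int.floordiv t i) f).1 + 1) := by ring
      rw [this]
    · have hd' : (PySem.Int.mod t i == 0) = false := by simpa using hd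
      simp only [pfWhileB, pfDivOut, hd', if_false, Bool.false_eq_true]
      simp

-- B's while loop from the empty dict produces exactly {i : count}
theorem pfWhileB_empty (i t : Int) (f : Nat) (hd : PySem.Int.mod t i = 0) :
    pfWhileB i t PySem.Dict.empty (f+1) =
      (PySem.Dict.mk [(i, (pfDivOut i t (f+1)).1)], (pfDivOut i t (f+1)).2) := by
  have hd' : (PySem.Int.mod t i == 0) = true := by simpa using hd
  have hins : (PySem.Dict.empty : PySem.Dict Int Int).insert i
      ((PySem.Dict.empty : PySem.Dict Int Int).getD i 0 + 1) = PySem.Dict.mk [(i, 1)] := by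
    simp [PySem.Dict.insert, PySem.Dict.getD, PySem.Dict.get?, PySem.Dict.contains,
      PySem.Dict.empty]
  simp only [pfWhileB, pfDivOut, hd', if_true, hins, pfWhileB_single]
  have : (1 : Int) + (pfDivOut i (PySem.Int.floordiv t i) f).1
      = (pfDivOut i (PySem.Int.floordiv t i) f).1 + 1 := by ring
  rw [this]

-- B's while loop never shrinks the dict
theorem pfWhileB_size_mono (i : Int) :
    ∀ (fuel : Nat) (t : Int) (f : PySem.Dict Int Int),
      f.size ≤ (pfWhileB i t f fuel).1.size := by
  intro fuel
  induction fuel with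
  | zero => intro t f; simp [pfWhileB]
  | succ fu ih =>
    intro t f
    by_cases hd : PySem.Int.mod t i = 0
    · have hd' : (PySem.Int.mod t i == 0) = true := by simpa using hd
      simp only [pfWhileB, hd', if_true]
      refine le_trans ?_ (ih _ _)
      rw [PySem.Dict.size_insert]
      split <;> omega
    · rw [pfWhileB_nodvd i t _ _ hd]

-- if i divides temp and i is a fresh key, the dict grows
theorem pfWhileB_size_grow (i t : Int) (f : PySem.Dict Int Int) (fuel : Nat)
    (hd : PySem.Int.mod t i = 0) (hc : f.contains i = false) :
    f.size + 1 ≤ (pfWhileB i t f (fuel+1)).1.size := by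
  have hd' : (PySem.Int.mod t i == 0) = true := by simpa using hd
  simp only [pfWhileB, hd', if_true]
  refine le_trans ?_ (pfWhileB_size_mono i fuel _ _)
  rw [PySem.Dict.size_insert, hc]
  simp

-- B's outer loop never shrinks the dict
theorem pfLoopB_size_mono :
    ∀ (L : List Int) (t : Int) (f : PySem.Dict Int Int),
      f.size ≤ (pfLoopB L t f).1.size := by
  intro L
  induction L with
  | nil => intro t f; simp [pfLoopB]
  | cons i rest ih =>
    intro t f
    simp only [pfLoopB]
    exact le_trans (pfWhileB_size_mono i t.natAbs t f) (ih _ _)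

-- once temp = 1, nothing in the range divides it: the loop is the identity
theorem pfLoopB_one (L : List Int) (hL : ∀ j ∈ L, 2 ≤ j) (f : PySem.Dict Int Int) :
    pfLoopB L 1 f = (f, 1) := by
  induction L with
  | nil => rfl
  | cons i rest ih =>
    have hi : 2 ≤ i := hL i (by simp)
    have hm : PySem.Int.mod (1 : Int) i ≠ 0 := by
      rw [PySem.Int.mod_eq_emod_of_pos (by omega), Int.emod_eq_of_lt (by omega) (by omega)]
      omega
    simp only [pfLoopB, pfWhileB_nodvd i 1 f _ hm]
    exact ih (fun j hj => hL j (by simp [hj]))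

-- invariant for the tail of B's loop after the first prime i0 was divided out leaving r:
-- the dict keeps at least one entry, and if it still has exactly one entry then
-- nothing further divided and the state is unchanged
theorem pfLoopB_tail (i0 p r : Int) (hr : PySem.Int.mod r i0 ≠ 0) :
    ∀ (L : List Int), (∀ j ∈ L, 2 ≤ j) →
    ∀ (t : Int) (f : PySem.Dict Int Int),
      1 ≤ f.size → (f.size = 1 → f = PySem.Dict.mk [(i0, p)] ∧ t = r) →
      1 ≤ (pfLoopB L t f).1.size ∧
        ((pfLoopB L t f).1.size = 1 →
          (pfLoopB L t f).1 = PySem.Dict.mk [(i0, p)] ∧ (pfLoopB L t f).2 = r) := by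
  intro L
  induction L with
  | nil => intro _ t f h1 h2; exact ⟨h1, h2⟩
  | cons i rest ih =>
    intro hL t f h1 h2
    have hrest : ∀ j ∈ rest, 2 ≤ j := fun j hj => hL j (by simp [hj])
    simp only [pfLoopB]
    by_cases hsz : f.size = 1
    · obtain ⟨hf, ht⟩ := h2 hsz
      subst hf ht
      by_cases hd : PySem.Int.mod t i = 0
      · -- i divides t = r, so i ≠ i0 and the dict grows to size ≥ 2
        have hne : i ≠ i0 := fun h => hr (h ▸ hd)
        have hc : (PySem.Dict.mk [(i0, p)]).contains i = false := by
          simp only [PySem.Dict.contains_mk, List.any_cons, List.any_nil, Bool.or_false]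
          simpa using fun h => absurd h.symm hne
        obtain ⟨fu, hfu⟩ : ∃ fu, t.natAbs = fu + 1 := by
          refine ⟨t.natAbs - 1, ?_⟩
          have ht0 : t ≠ 0 := by
            intro h0
            subst h0
            exact hr (by simpa using hd)
          omega
        rw [hfu]
        have hg := pfWhileB_size_grow i t (PySem.Dict.mk [(i0, p)]) fu hd hc
        have hmono := pfLoopB_size_mono rest (pfWhileB i t (PySem.Dict.mk [(i0, p)]) (fu+1)).2
          (pfWhileB i t (PySem.Dict.mk [(i0, p)]) (fu+1)).1
        have hsz1 : (PySem.Dict.mk [(i0, p)] : PySem.Dict Int Int).size = 1 := rfl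
        exact ⟨by omega, fun h => by omega⟩
      · rw [pfWhileB_nodvd i t _ _ hd]
        exact ih hrest t _ h1 h2
    · -- size ≥ 2 already: stays ≥ 2 forever
      have hmono1 := pfWhileB_size_mono i t.natAbs t f
      have hmono2 := pfLoopB_size_mono rest (pfWhileB i t f t.natAbs).2 (pfWhileB i t f t.natAbs).1
      exact ⟨by omega, fun h => by omega⟩

-- main equivalence over an arbitrary candidate list
theorem pf_main (L : List Int) (hL : ∀ j ∈ L, 2 ≤ j) :
    ∀ (n : Int), 2 ≤ n →
      pfLoopA n L =
        (let s := pfLoopB L n PySem.Dict.empty;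
         if s.1.items = [] then some [(n, 1)]
         else if s.1.size = 1 ∧ s.2 = 1 then some s.1.items
         else none) := by
  induction L with
  | nil =>
    intro n _
    simp [pfLoopA, pfLoopB, PySem.Dict.empty]
  | cons i rest ih =>
    intro n hn
    have hi : 2 ≤ i := hL i (by simp)
    have hrest : ∀ j ∈ rest, 2 ≤ j := fun j hj => hL j (by simp [hj])
    by_cases hd : PySem.Int.mod n i = 0
    · have hd' : (PySem.Int.mod n i == 0) = true := by simpa using hd
      obtain ⟨fu, hfu⟩ : ∃ fu, n.natAbs = fu + 1 := ⟨n.natAbs - 1, by omega⟩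
      obtain ⟨c, r, hcr⟩ : ∃ c r, pfDivOut i n n.natAbs = (c, r) := ⟨_, _, rfl⟩
      have hspec := pfDivOut_spec i hi n.natAbs n (by omega) (le_refl _)
      rw [hcr] at hspec
      obtain ⟨hr1, hrnd⟩ := hspec
      have hB : pfWhileB i n PySem.Dict.empty n.natAbs = (PySem.Dict.mk [(i, c)], r) := by
        rw [hfu, pfWhileB_empty i n fu hd, ← hfu, hcr]
      simp only [pfLoopA, pfLoopB, hd', if_true, hB, hcr]
      by_cases hrone : r = 1
      · subst hrone
        rw [pfLoopB_one rest hrest]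
        simp [PySem.Dict.size]
      · obtain ⟨hge, himpl⟩ := pfLoopB_tail i c r hrnd rest hrest r (PySem.Dict.mk [(i, c)])
          (by simp [PySem.Dict.size]) (fun _ => ⟨rfl, rfl⟩)
        rw [if_pos (by simpa using hrone)]
        have hne : (pfLoopB rest r (PySem.Dict.mk [(i, c)])).1.items ≠ [] := by
          intro h
          have : (pfLoopB rest r (PySem.Dict.mk [(i, c)])).1.size = 0 := by
            simp [PySem.Dict.size, h]
          omega
        rw [if_neg hne, if_neg]
        rintro ⟨hs1, ht1⟩
        exact hrone ((himpl hs1).2 ▸ ht1)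
    · have hd' : (PySem.Int.mod n i == 0) = false := by simpa using hd
      simp only [pfLoopA, pfLoopB, hd', if_false, Bool.false_eq_true,
        pfWhileB_nodvd i n _ _ hd]
      exact ih hrest n hn

-- ===== VERDICT (by name: the statement is the Claim_ definition above) =====
theorem custom_pf_spec : Claim_equal_custom_pf := by
  intro n _ hpre
  unfold Spec_custom_pf
  by_cases h1 : n = 1
  · subst h1; rfl
  · by_cases h0 : n = 0
    · subst h0; decide
    · have hn : 2 ≤ n := by
        have : 0 ≤ n := hpre
        omega
      have hL : ∀ j ∈ PySem.List.pyRange 2 (Int.sqrt n + 1) 1, 2 ≤ j := by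
        intro j hj
        rw [PySem.List.mem_pyRange_one] at hj
        exact hj.1
      unfold custom_pf custom_pf_alt
      rw [if_neg (by simpa using h1), if_neg (by simpa using h1)]
      exact pf_main _ hL n hn
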